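-- pv_equiv track=rewrite | github.com/DongKeun2/algorithm | Programmers/Lv2/이진 변환 반복하기.py | solution
-- ===== SOURCE A (Python) =====
-- def solution(s):
--     cnt = 0
--     zero_num = 0
--     while True:
--         if s == "1":
--             break
--         n = len(s)
--         s = ''.join(s.split('0'))
--         m = len(s)
--         zero_num += n - m
--         cnt += 1
--
--         s = bin(m).lstrip('0b')
--     answer = [cnt, zero_num]
--     return answer
-- ===== SOURCE B (Python) =====
-- def solution(s):
--     if s == "1":
--         return [0, 0]
--     ones = sum(1 for c in s if c != '0')
--     # trajectory of survivor counts: ones, popcount(ones), ... down to 1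
--     chain = [ones]
--     while chain[-1] != 1:
--         chain.append(chain[-1].bit_count())
--     # zeros removed: first pass on the string, then telescoped over the trajectory
--     zeros = (len(s) - ones) + sum(x.bit_length() for x in chain[:-1]) - sum(chain[1:])
--     return [len(chain), zeros]
-- ===== Notes on version B (the rewrite author's own statement) =====
-- stated objective: alternative
-- what changed: A mutates the string in a single while-loop (split on '0', join, bin(), lstrip) keeping two running counters; B makes one counting pass over the string, then materialises the whole trajectory of survivor counts as an explicit integer list (m, popcount(m), ...) and computes the answer afterwards by aggregation over that list: the step count is its length and the zeros removed are a telescoped difference of two slice sums.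
import Mathlib
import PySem

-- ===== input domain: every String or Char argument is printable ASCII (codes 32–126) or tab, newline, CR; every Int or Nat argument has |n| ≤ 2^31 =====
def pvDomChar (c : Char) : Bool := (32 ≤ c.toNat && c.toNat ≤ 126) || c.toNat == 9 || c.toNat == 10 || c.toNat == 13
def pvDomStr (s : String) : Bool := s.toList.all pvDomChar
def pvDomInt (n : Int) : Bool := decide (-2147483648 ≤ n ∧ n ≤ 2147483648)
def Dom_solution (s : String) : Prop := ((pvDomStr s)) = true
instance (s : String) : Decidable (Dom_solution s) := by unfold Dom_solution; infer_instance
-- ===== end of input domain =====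

-- B replaces A's in-place string rewriting loop by one counting pass over the string, an explicit
-- list of the trajectory of survivor counts, and a final aggregation (length + telescoped slice sums)
-- over that list (objective: alternative; same asymptotic cost).


-- ===== PORT A =====
-- A's loop state is the STRING s; each iteration removes the '0' characters and replaces s by
-- bin(m) stripped of its "0b" prefix.  The lemmas before `solLoopA` are cited by its
-- `decreasing_by` (termination measure `muA`): Python's loop runs forever when s has no
-- character other than '0' (excluded by Pre_solution); the `if m = 0` branch is a totality
-- guard for exactly that case and changes nothing elsewhere.

-- `binDigits m` = the binary digits of m, msb first (reasoning normal form of `Nat.toDigits 2`).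
def binDigits (m : Nat) : List Char :=
  if m < 2 then [if m = 1 then '1' else '0']
  else binDigits (m / 2) ++ [if m % 2 = 1 then '1' else '0']
termination_by m
decreasing_by exact Nat.div_lt_self (by omega) (by omega)

theorem binDigits_ge_two (m : Nat) (h : 2 ≤ m) :
    binDigits m = binDigits (m / 2) ++ [if m % 2 = 1 then '1' else '0'] := by
  rw [binDigits]; simp [Nat.not_lt.mpr h]

theorem toDigitsCore_two (f : Nat) : ∀ (n : Nat) (acc : List Char), n < f →
    Nat.toDigitsCore 2 f n acc = binDigits n ++ acc := by
  induction f with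
  | zero => intro n acc h; omega
  | succ f ih =>
    intro n acc h
    rw [Nat.toDigitsCore]
    by_cases h2 : n / 2 = 0
    · have : n < 2 := by omega
      rw [binDigits]
      simp only [this, if_pos]
      interval_cases n <;> simp [Nat.digitChar]
    · rw [if_neg h2, ih (n / 2) _ (by omega)]
      rw [binDigits_ge_two n (by omega)]
      have : (n % 2).digitChar = if n % 2 = 1 then '1' else '0' := by
        have := Nat.mod_lt n (show 0 < 2 by omega)
        interval_cases h : n % 2 <;> simp [Nat.digitChar]
      simp [this]

theorem toDigits_two (n : Nat) : Nat.toDigits 2 n = binDigits n := by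
  have := toDigitsCore_two (n + 1) n [] (by omega)
  simpa [Nat.toDigits] using this

theorem flatten_intersperse_nil (xs : List (List Char)) :
    (List.intersperse [] xs).flatten = xs.flatten := by
  induction xs with
  | nil => rfl
  | cons a t ih =>
    cases t with
    | nil => rfl
    | cons b u => simp_all [List.intersperse]

theorem splitOn_go_zero (f : Nat) : ∀ (l cur : List Char) (acc : List (List Char)), l.length < f →
    (PySem.Chars.splitOn.go ['0'] f l cur acc).flatten
      = acc.reverse.flatten ++ cur.reverse ++ l.filter (fun c => c != '0') := by
  induction f with
  | zero => intro l cur acc h; omega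
  | succ f ih =>
    intro l cur acc h
    cases l with
    | nil =>
      rw [PySem.Chars.splitOn.go]
      · simp
      · omega
    | cons c rest =>
      rw [PySem.Chars.splitOn.go]
      by_cases hc : c = '0'
      · subst hc
        have hp : List.isPrefixOf ['0'] ('0' :: rest) = true := by simp [List.isPrefixOf]
        rw [if_pos hp]
        simp only [List.length_singleton]
        rw [ih _ _ _ (by simp only [List.drop_succ_cons, List.drop_zero]; simp at h; omega)]
        simp
      · have hp : List.isPrefixOf ['0'] (c :: rest) = false := by simp [List.isPrefixOf, Ne.symm hc]
        rw [hp]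
        simp only [Bool.false_eq_true, if_false]
        rw [ih _ _ _ (by simp at h; omega)]
        simp [hc]

theorem join_splitOn_zero (s : List Char) :
    PySem.Chars.join [] (PySem.Chars.splitOn s ['0']) = s.filter (fun c => c != '0') := by
  have := splitOn_go_zero (s.length + 1) s [] [] (by omega)
  simpa [PySem.Chars.join, PySem.Chars.splitOn, List.intercalate, flatten_intersperse_nil] using this

theorem binDigits_lt_two (m : Nat) (h : m < 2) :
    binDigits m = [if m = 1 then '1' else '0'] := by
  rw [binDigits]; simp [h]

theorem binDigits_one : binDigits 1 = ['1'] := by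
  rw [binDigits_lt_two 1 (by omega)]; rfl

theorem binDigits_head (m : Nat) (h : 1 ≤ m) : ∃ t, binDigits m = '1' :: t := by
  induction m using Nat.strong_induction_on with
  | _ m ih =>
    by_cases h2 : m < 2
    · have : m = 1 := by omega
      subst this
      exact ⟨[], binDigits_one⟩
    · rw [binDigits_ge_two m (by omega)]
      obtain ⟨t, ht⟩ := ih (m / 2) (Nat.div_lt_self (by omega) (by omega)) (by omega)
      exact ⟨t ++ [if m % 2 = 1 then '1' else '0'], by rw [ht]; rfl⟩

theorem binDigits_binary (m : Nat) : ∀ c ∈ binDigits m, c = '0' ∨ c = '1' := by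
  induction m using Nat.strong_induction_on with
  | _ m ih =>
    by_cases h2 : m < 2
    · rw [binDigits]
      intro c hc
      simp only [if_pos h2] at hc
      simp at hc
      subst hc
      split <;> simp
    · rw [binDigits_ge_two m (by omega)]
      intro c hc
      rcases List.mem_append.mp hc with h | h
      · exact ih (m / 2) (Nat.div_lt_self (by omega) (by omega)) c h
      · simp at h; subst h; split <;> simp

theorem length_binDigits (m : Nat) (h : 1 ≤ m) :
    (binDigits m).length = PySem.Int.bitLength (m : Int) := by
  induction m using Nat.strong_induction_on with
  | _ m ih =>
    by_cases h2 : m < 2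
    · have : m = 1 := by omega
      subst this
      rw [binDigits_one]
      decide
    · rw [binDigits_ge_two m (by omega), PySem.Int.bitLength_natCast (by omega)]
      have := ih (m / 2) (Nat.div_lt_self (by omega) (by omega)) (by omega)
      simp [this]

theorem filter_binDigits (m : Nat) :
    ((binDigits m).filter (fun c => c != '0')).length = PySem.Int.bitCount (m : Int) := by
  induction m using Nat.strong_induction_on with
  | _ m ih =>
    by_cases h2 : m < 2
    · interval_cases m
      · rw [binDigits_lt_two 0 (by omega)]
        decide
      · rw [binDigits_one]
        decide
    · rw [binDigits_ge_two m (by omega), PySem.Int.bitCount_natCast (by omega)]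
      have := ih (m / 2) (Nat.div_lt_self (by omega) (by omega))
      rcases Nat.mod_two_eq_zero_or_one m with hp | hp <;>
        simp [List.filter_append, this, hp]
      omega

theorem bitLength_le (m : Nat) : PySem.Int.bitLength (m : Int) ≤ m := by
  induction m using Nat.strong_induction_on with
  | _ m ih =>
    by_cases h0 : m = 0
    · subst h0; simp
    · rw [PySem.Int.bitLength_natCast (by omega)]
      have := ih (m / 2) (Nat.div_lt_self (by omega) (by omega))
      omega

theorem bitCount_le (m : Nat) : PySem.Int.bitCount (m : Int) ≤ m := by
  induction m using Nat.strong_induction_on with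
  | _ m ih =>
    by_cases h0 : m = 0
    · subst h0; simp
    · rw [PySem.Int.bitCount_natCast (by omega)]
      have := ih (m / 2) (Nat.div_lt_self (by omega) (by omega))
      omega

theorem bitCount_lt (m : Nat) (h : 2 ≤ m) : PySem.Int.bitCount (m : Int) < m := by
  rw [PySem.Int.bitCount_natCast (by omega)]
  have := bitCount_le (m / 2)
  omega

-- s.lstrip('0b') drops leading characters belonging to {'0','b'} (no PySem primitive): exact.
def pvLstrip0b (cs : List Char) : List Char := cs.dropWhile (fun c => c == '0' || c == 'b')

theorem lstrip_bin (m : Nat) (h : 1 ≤ m) :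
    pvLstrip0b (PySem.Int.toBinChars0b (m : Int)) = binDigits m := by
  obtain ⟨t, ht⟩ := binDigits_head m h
  simp only [PySem.Int.toBinChars0b, pvLstrip0b]
  rw [if_neg (by omega), Int.toNat_natCast, toDigits_two, ht]
  simp [List.dropWhile]

def muA (s : List Char) : Nat :=
  s.length + (s.filter (fun c => c != '0')).length
    + (if s.all (fun c => c == '0' || c == '1') then 0 else 1)

theorem muA_dec (s : List Char) (h1 : s ≠ ['1'])
    (hm : (s.filter (fun c => c != '0')).length ≠ 0) :
    muA (binDigits (s.filter (fun c => c != '0')).length) < muA s := by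
  set m := (s.filter (fun c => c != '0')).length with hmdef
  have hmle : m ≤ s.length := by
    rw [hmdef]; exact List.length_filter_le _ _
  have hbin : ((binDigits m).all (fun c => c == '0' || c == '1')) = true := by
    rw [List.all_eq_true]
    intro c hc
    rcases binDigits_binary m c hc with h | h <;> simp [h]
  have hlen : (binDigits m).length = PySem.Int.bitLength (m : Int) :=
    length_binDigits m (by omega)
  have hcnt : ((binDigits m).filter (fun c => c != '0')).length = PySem.Int.bitCount (m : Int) :=
    filter_binDigits m
  by_cases h2 : 2 ≤ m
  · have hbl := bitLength_le m
    have hbc := bitCount_lt m h2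
    simp only [muA, hbin, if_pos, hlen, hcnt]
    omega
  · have hm1 : m = 1 := by omega
    rw [hm1, binDigits_one]
    by_cases hl : s.length = 1
    · obtain ⟨c, hc⟩ := List.length_eq_one_iff.mp hl
      subst hc
      have hc0 : (c != '0') = true := by
        by_contra hcc
        simp at hcc
        rw [hcc] at hmdef
        simp [hmdef] at hm1
      have hc1 : c ≠ '1' := by
        intro hcc; exact h1 (by rw [hcc])
      have : ([c].all (fun c => c == '0' || c == '1')) = false := by
        simp at hc0
        simp [hc0, hc1]
      simp [muA, this]
      rw [← hmdef]
      omega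
    · have : 2 ≤ s.length := by omega
      simp only [muA]
      simp
      omega

def solLoopA (s : List Char) (cnt zero_num : Int) : List Int :=
  if s = ['1'] then [cnt, zero_num]
  else
    let n := s.length
    let s1 := PySem.Chars.join [] (PySem.Chars.splitOn s ['0'])
    let m := s1.length
    let zero' := zero_num + ((n : Int) - (m : Int))
    let cnt' := cnt + 1
    if m = 0 then [cnt', zero']
    else solLoopA (pvLstrip0b (PySem.Int.toBinChars0b (m : Int))) cnt' zero'
termination_by muA s
decreasing_by
  rename_i h1 hm
  have hm' : ¬ (PySem.Chars.join [] (PySem.Chars.splitOn s ['0'])).length = 0 := hm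
  rw [join_splitOn_zero] at hm'
  rw [join_splitOn_zero, lstrip_bin _ (by omega)]
  exact muA_dec s h1 hm'

def solution (s : String) : List Int := solLoopA s.toList 0 0

-- ===== PORT B =====
-- B: handle s == "1"; one counting pass over the string (a fold, = Source B's sum(...)); then build
-- `chain`, the explicit trajectory [ones, popcount(ones), …, 1] (Source B's while/append loop, the
-- obvious cons-building recursion here; `.bit_count()` = PySem.Int.bitCount); finally aggregate:
-- length of the chain, and the telescoped slice sums (chain[:-1] = dropLast, chain[1:] = tail —
-- exact for every list).  The `m ≤ 0` branch is a totality guard: Python's while-loop never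
-- terminates there (excluded by Pre_solution).
def chainB (m : Int) : List Int :=
  if m = 1 then [m]
  else if m ≤ 0 then [m]
  else m :: chainB (PySem.Int.bitCount m : Int)
termination_by m.toNat
decreasing_by
  rename_i h1 h0
  have hm2 : 2 ≤ m := by omega
  have : m = ((m.toNat : Nat) : Int) := by omega
  rw [this]
  have := bitCount_lt m.toNat (by omega)
  omega

def solution_alt (s : String) : List Int :=
  if s = "1" then [0, 0]
  else
    let ones : Int := s.toList.foldl (fun acc c => if c != '0' then acc + 1 else acc) 0
    let chain := chainB ones
    let zeros : Int := ((s.toList.length : Int) - ones)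
      + (chain.dropLast.map (fun x => (PySem.Int.bitLength x : Int))).sum - chain.tail.sum
    [(chain.length : Int), zeros]

-- ===== PRECONDITION & SPEC =====
-- Pre_ excludes exactly the strings with no character other than '0' (empty or all-'0'):
-- on those Python A (and Python B) loop forever and return nothing.
def Pre_solution (s : String) : Prop := s.toList.any (fun c => c != '0') = true
instance (s : String) : Decidable (Pre_solution s) := by unfold Pre_solution; infer_instance

def pvWitness_solution : String := "110010"

def Spec_solution (s : String) (out : List Int) : Prop := out = solution_alt s
instance (s : String) (out : List Int) : Decidable (Spec_solution s out) := by unfold Spec_solution; infer_instance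

-- ===== CLAIM (what is proved, stated in full; the proofs are below) =====
def Claim_equal_solution : Prop := ∀ (s : String), Dom_solution s → Pre_solution s → Spec_solution s (solution s)

-- ===== LEMMAS AND PROOFS =====

theorem chainB_head (m : Int) : ∃ t, chainB m = m :: t := by
  rw [chainB]
  split
  · exact ⟨[], rfl⟩
  · split
    · exact ⟨[], rfl⟩
    · exact ⟨_, rfl⟩

theorem bitCount_pos (m : Nat) (h : 1 ≤ m) : 0 < PySem.Int.bitCount (m : Int) := by
  induction m using Nat.strong_induction_on with
  | _ m ih =>
    rw [PySem.Int.bitCount_natCast (by omega)]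
    rcases Nat.mod_two_eq_zero_or_one m with hp | hp
    · have := ih (m / 2) (Nat.div_lt_self (by omega) (by omega)) (by omega)
      omega
    · omega

theorem binDigits_eq_one_iff (m : Nat) : binDigits m = ['1'] ↔ m = 1 := by
  constructor
  · intro h
    by_cases h2 : m < 2
    · rw [binDigits_lt_two m h2] at h
      by_contra hne
      simp [hne] at h
    · rw [binDigits_ge_two m (by omega)] at h
      have h1 : (binDigits (m / 2)).length + 1 = 1 := by
        have := congrArg List.length h
        simpa using this
      have h2 : binDigits (m / 2) = [] := List.length_eq_zero_iff.mp (by omega)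
      obtain ⟨t, ht⟩ := binDigits_head (m / 2) (by omega)
      simp [ht] at h2
  · intro h; subst h; exact binDigits_one

-- the bridge between A's loop and B's trajectory list: A's loop, started at the binary digits of
-- m, returns B's aggregates over chainB m.
theorem loopA_eq_chain (m : Nat) : 1 ≤ m → ∀ cnt zero : Int,
    solLoopA (binDigits m) cnt zero
      = [cnt - 1 + ((chainB m).length : Int),
         zero + ((chainB m).dropLast.map (fun x => (PySem.Int.bitLength x : Int))).sum
              - (chainB m).tail.sum] := by
  induction m using Nat.strong_induction_on with
  | _ m ih =>
    intro h cnt zero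
    by_cases hm1 : m = 1
    · subst hm1
      rw [binDigits_one, solLoopA, chainB]
      simp
    · have hm2 : 2 ≤ m := by omega
      have hne : binDigits m ≠ ['1'] := fun hc => hm1 ((binDigits_eq_one_iff m).mp hc)
      set p := PySem.Int.bitCount (m : Int) with hp
      have hppos : 1 ≤ p := bitCount_pos m h
      have hplt : p < m := bitCount_lt m hm2
      rw [solLoopA, if_neg hne]
      simp only [join_splitOn_zero, filter_binDigits, ← hp]
      rw [if_neg (by omega : ¬ p = 0)]
      rw [lstrip_bin _ (by omega)]
      rw [ih p hplt hppos]
      conv_rhs => rw [chainB]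
      rw [if_neg (by exact_mod_cast hm1), if_neg (by omega : ¬ (m : Int) ≤ 0)]
      rw [← hp]
      obtain ⟨t, ht⟩ := chainB_head (p : Int)
      rw [ht]
      simp only [List.dropLast_cons₂, List.map_cons, List.sum_cons, List.tail_cons,
        List.length_cons]
      rw [length_binDigits m h]
      simp only [List.cons.injEq, and_true]
      constructor
      · push_cast; ring
      · ring

theorem solution_eq_alt (s : String) (hpre : Pre_solution s) : solution s = solution_alt s := by
  by_cases hs : s = "1"
  · subst hs
    show solLoopA ['1'] 0 0 = _
    rw [solLoopA, solution_alt]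
    simp
  · have hsl : s.toList ≠ ['1'] := by
      intro h
      exact hs (String.toList_inj.mp (by rw [h]; rfl))
    have hm0 : (s.toList.filter (fun c => c != '0')).length ≠ 0 := by
      obtain ⟨c, hc, hc0⟩ := List.any_eq_true.mp hpre
      have : c ∈ s.toList.filter (fun c => c != '0') := by
        simp [List.mem_filter, hc, hc0]
      intro hlen
      rw [List.length_eq_zero_iff.mp hlen] at this
      simp at this
    rw [solution, solution_alt, if_neg hs, solLoopA, if_neg hsl]
    simp only [join_splitOn_zero]
    rw [if_neg hm0]
    rw [lstrip_bin _ (by omega)]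
    rw [loopA_eq_chain _ (by omega)]
    rw [PySem.List.foldl_if_add_one]
    rw [List.countP_eq_length_filter]
    norm_num

-- ===== VERDICT (by name: the statement is the Claim_ definition above) =====
theorem solution_spec : Claim_equal_solution := by
  intro s _ hpre
  unfold Spec_solution
  exact solution_eq_alt s hpre
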